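-- pv_equiv track=rewrite | github.com/smohapatra1/scripting | python/practice/start_again/2025/01202025/Mintimes_A_hastobe_repated_to_be_a_substring.py | minRepeats
-- ===== SOURCE A (Python) =====
-- def minRepeats(s1, s2):
--     n = len(s1)
--     m = len(s2)
--     for i in range(n):
--         res = 1
--         F = True
--         for j in range(m):
--             if s1[i] != s2[j]:
--                 F = False
--                 break
--             i += 1
--             if i == n :
--                 i = 0
--                 if j != m - 1:
--                     res += 1
--         if F :
--             return res
--     return -1
-- ===== SOURCE B (Python) =====
-- def minRepeats(s1, s2):
--     # Repeat s1 enough times, one library substring search, derive the count from the match index.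
--     n, m = len(s1), len(s2)
--     if n == 0:
--         return -1
--     if m == 0:
--         return 1
--     k = (m + n - 1) // n + 1
--     p = (s1 * k).find(s2)
--     if p == -1:
--         return -1
--     return (p + m - 1) // n + 1
-- ===== Notes on version B (the rewrite author's own statement) =====
-- stated objective: faster
-- what changed: A rescans s2 cyclically from every start offset of s1 (O(n*m)); B builds s1 repeated ceil(m/n)+1 times once, does a single library substring search, and derives the repeat count arithmetically from the match index.
import Mathlib
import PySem

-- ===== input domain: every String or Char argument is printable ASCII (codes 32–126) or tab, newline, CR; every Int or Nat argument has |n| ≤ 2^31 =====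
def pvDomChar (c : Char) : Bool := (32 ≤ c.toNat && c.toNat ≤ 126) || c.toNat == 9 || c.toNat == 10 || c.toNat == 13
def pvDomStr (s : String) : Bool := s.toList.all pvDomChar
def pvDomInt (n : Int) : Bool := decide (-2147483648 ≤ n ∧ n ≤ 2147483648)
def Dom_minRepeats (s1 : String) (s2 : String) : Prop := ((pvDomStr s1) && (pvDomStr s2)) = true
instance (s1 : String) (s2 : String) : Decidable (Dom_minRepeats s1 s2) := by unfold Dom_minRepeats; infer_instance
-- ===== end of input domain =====

-- B replaces A's per-offset cyclic rescans with one substring search on a sufficiently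
-- repeated copy of s1, deriving the count from the match index.

-- ===== PORT A =====
-- inner 'for j in range(m)' loop of A: mutable i (cursor into s1) and res; none = break (F = False)
def pvAInner (c1 c2 : List Char) (n m : Nat) (j i res : Nat) : Option Nat :=
  if j < m then
    if c1.getD i ' ' ≠ c2.getD j ' ' then none
    else
      let i' := i + 1
      if i' = n then
        if j ≠ m - 1 then pvAInner c1 c2 n m (j+1) 0 (res+1)
        else pvAInner c1 c2 n m (j+1) 0 res
      else pvAInner c1 c2 n m (j+1) i' res
  else some res
termination_by m - j

-- outer 'for i in range(n)' loop of A: first successful inner run returns its res, else -1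
def pvALoop (c1 c2 : List Char) (n m : Nat) : List Nat → Int
  | [] => -1
  | i :: rest =>
    match pvAInner c1 c2 n m 0 i 1 with
    | some res => (res : Int)
    | none => pvALoop c1 c2 n m rest

def minRepeats (s1 : String) (s2 : String) : Int :=
  let c1 := s1.toList
  let c2 := s2.toList
  pvALoop c1 c2 c1.length c2.length (List.range c1.length)

-- ===== PORT B =====
def minRepeats_alt (s1 : String) (s2 : String) : Int :=
  let c1 := s1.toList
  let c2 := s2.toList
  let n := c1.length
  let m := c2.length
  if n = 0 then -1
  else if m = 0 then 1
  else
    let k := (m + n - 1) / n + 1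
    let p := PySem.Chars.find ((List.replicate k c1).flatten) c2   -- (s1 * k).find(s2)
    if p = -1 then -1
    else ((p.toNat + m - 1) / n + 1 : Nat)

-- ===== PRECONDITION & SPEC =====
def Spec_minRepeats (s1 : String) (s2 : String) (out : Int) : Prop := out = minRepeats_alt s1 s2
instance (s1 : String) (s2 : String) (out : Int) : Decidable (Spec_minRepeats s1 s2 out) := by unfold Spec_minRepeats; infer_instance

-- ===== CLAIM (what is proved, stated in full; the proofs are below) =====
def Claim_equal_minRepeats : Prop := ∀ (s1 : String) (s2 : String), Dom_minRepeats s1 s2 → Spec_minRepeats s1 s2 (minRepeats s1 s2)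

-- ===== LEMMAS AND PROOFS =====

-- A's inner loop in closed form: it succeeds iff s2 matches the cyclic read of s1 starting at
-- offset i (from position j of s2 on), and then adds the number of wraps before the last char.
lemma pvAInner_eq (c1 c2 : List Char) (n m : Nat) :
    ∀ d j i res, m - j = d → i < n →
    pvAInner c1 c2 n m j i res =
      if ∀ t, t < m - j → c1.getD ((i + t) % n) ' ' = c2.getD (j + t) ' '
      then some (res + (i + (m - j) - 1) / n) else none := by
  intro d
  induction d with
  | zero =>
    intro j i res hd hi
    rw [pvAInner]
    rw [if_neg (show ¬ j < m by omega), if_pos (by intro t ht; omega)]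
    have h0 : (i + (m - j) - 1) / n = 0 := Nat.div_eq_of_lt (by omega)
    rw [h0, Nat.add_zero]
  | succ d ih =>
    intro j i res hd hi
    have hj : j < m := by omega
    have key : (∀ t, t < m - j → c1.getD ((i + t) % n) ' ' = c2.getD (j + t) ' ')
        ↔ (c1.getD i ' ' = c2.getD j ' ' ∧
           ∀ t, t < m - (j+1) → c1.getD ((i + 1 + t) % n) ' ' = c2.getD (j + 1 + t) ' ') := by
      constructor
      · intro h
        refine ⟨by simpa [Nat.mod_eq_of_lt hi] using h 0 (by omega), ?_⟩
        intro t ht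
        have := h (t+1) (by omega)
        rw [show i + (t+1) = i + 1 + t by omega, show j + (t+1) = j + 1 + t by omega] at this
        exact this
      · rintro ⟨h0, h⟩ t ht
        cases t with
        | zero => simpa [Nat.mod_eq_of_lt hi] using h0
        | succ t =>
          have := h t (by omega)
          rw [show i + (t+1) = i + 1 + t by omega, show j + (t+1) = j + 1 + t by omega]
          exact this
    rw [pvAInner, if_pos hj]
    by_cases hc : c1.getD i ' ' = c2.getD j ' '
    · rw [if_neg (by simpa using hc)]
      simp only []
      by_cases hin : i + 1 = n
      · have hmod : ∀ t : Nat, (0 + t) % n = (i + 1 + t) % n := by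
          intro t; rw [Nat.zero_add, hin, Nat.add_mod_left]
        by_cases hjm : j ≠ m - 1
        · rw [if_pos hin, if_pos hjm, ih (j+1) 0 (res+1) (by omega) (by omega)]
          by_cases hcond : ∀ t, t < m - (j+1) → c1.getD ((i + 1 + t) % n) ' ' = c2.getD (j + 1 + t) ' '
          · rw [if_pos (by intro t ht; rw [hmod t]; exact hcond t ht),
                if_pos (key.mpr ⟨hc, hcond⟩)]
            have hv : res + 1 + (0 + (m - (j+1)) - 1) / n = res + (i + (m - j) - 1) / n := by
              have h2 : m - j ≥ 2 := by omega
              have e1 : i + (m - j) - 1 = (m - j - 2) + n := by omega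
              have e2 : 0 + (m - (j+1)) - 1 = m - j - 2 := by omega
              rw [e1, e2, Nat.add_div_right _ (by omega)]
              omega
            rw [hv]
          · rw [if_neg (by intro h; exact hcond (by intro t ht; rw [← hmod t]; exact h t ht)),
                if_neg (by rw [key]; tauto)]
        · rw [if_pos hin, if_neg hjm, ih (j+1) 0 res (by omega) (by omega)]
          have hj1 : j = m - 1 := by omega
          have hmj : m - (j+1) = 0 := by omega
          rw [if_pos (by intro t ht; omega), if_pos (key.mpr ⟨hc, by intro t ht; omega⟩)]
          have hv : res + (0 + (m - (j+1)) - 1) / n = res + (i + (m - j) - 1) / n := by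
            rw [hmj]
            have h1 : (i + (m - j) - 1) / n = 0 := Nat.div_eq_of_lt (by omega)
            rw [h1]
            norm_num
          rw [hv]
      · rw [if_neg hin, ih (j+1) (i+1) res (by omega) (by omega)]
        by_cases hcond : ∀ t, t < m - (j+1) → c1.getD ((i + 1 + t) % n) ' ' = c2.getD (j + 1 + t) ' '
        · rw [if_pos hcond, if_pos (key.mpr ⟨hc, hcond⟩)]
          have hv : i + 1 + (m - (j+1)) - 1 = i + (m - j) - 1 := by omega
          rw [hv]
        · rw [if_neg hcond, if_neg (by rw [key]; tauto)]
    · rw [if_pos (by simpa using hc), if_neg (by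
        intro h
        exact hc (by simpa [Nat.mod_eq_of_lt hi] using h 0 (by omega)))]

lemma pvALoop_none (c1 c2 : List Char) (n m : Nat) :
    ∀ l, (∀ i ∈ l, pvAInner c1 c2 n m 0 i 1 = none) → pvALoop c1 c2 n m l = -1 := by
  intro l
  induction l with
  | nil => intro _; rfl
  | cons a rest ih =>
    intro h
    rw [pvALoop, h a (by simp)]
    exact ih (fun i hi => h i (by simp [hi]))

lemma pvALoop_first (c1 c2 : List Char) (n m r : Nat) :
    ∀ (len a i0 : Nat), a ≤ i0 → i0 < a + len →
    pvAInner c1 c2 n m 0 i0 1 = some r →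
    (∀ i, a ≤ i → i < i0 → pvAInner c1 c2 n m 0 i 1 = none) →
    pvALoop c1 c2 n m (List.range' a len) = (r : Int) := by
  intro len
  induction len with
  | zero => intro a i0 h1 h2; omega
  | succ len ih =>
    intro a i0 h1 h2 hsome hnone
    rw [List.range'_succ, pvALoop]
    by_cases ha : a = i0
    · rw [ha, hsome]
    · rw [hnone a (le_refl a) (by omega)]
      exact ih (a+1) i0 (by omega) (by omega) hsome (fun i h1 h2 => hnone i (by omega) h2)

lemma pvBig_length (c1 : List Char) (k : Nat) :
    ((List.replicate k c1).flatten).length = k * c1.length := by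
  induction k with
  | zero => simp
  | succ k ih => simp [List.replicate_succ, ih, Nat.succ_mul]; ring

lemma pvBig_getElem? (c1 : List Char) (k q : Nat) (hq : q < k * c1.length) :
    ((List.replicate k c1).flatten)[q]? = c1[q % c1.length]? := by
  induction k generalizing q with
  | zero => omega
  | succ k ih =>
    have hsm : (k + 1) * c1.length = k * c1.length + c1.length := Nat.succ_mul k c1.length
    rw [List.replicate_succ, List.flatten_cons]
    by_cases h : q < c1.length
    · rw [List.getElem?_append_left h, Nat.mod_eq_of_lt h]
    · have heq : (q - c1.length) % c1.length = q % c1.length :=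
        (Nat.mod_eq_sub_mod (by omega)).symm
      rw [List.getElem?_append_right (by omega), ih (q - c1.length) (by omega), heq]

-- cyclic match of c2 at offset q in c1 ↔ c2 is a prefix of the repeated copy dropped at q
lemma pvMatch_iff_prefix (c1 c2 : List Char) (k q : Nat) (hn : 0 < c1.length)
    (hqm : q + c2.length ≤ k * c1.length) :
    (∀ t, t < c2.length → c1.getD ((q + t) % c1.length) ' ' = c2.getD t ' ')
      ↔ c2 <+: ((List.replicate k c1).flatten).drop q := by
  rw [List.prefix_iff_getElem?]
  constructor
  · intro h t ht
    rw [List.getElem?_drop, pvBig_getElem? c1 k (q+t) (by omega)]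
    have hlt : (q + t) % c1.length < c1.length := Nat.mod_lt _ hn
    have := h t ht
    rw [List.getD_eq_getElem _ _ hlt, List.getD_eq_getElem _ _ ht] at this
    rw [List.getElem?_eq_getElem hlt, this]
  · intro h t ht
    have := h t ht
    rw [List.getElem?_drop, pvBig_getElem? c1 k (q+t) (by omega)] at this
    have hlt : (q + t) % c1.length < c1.length := Nat.mod_lt _ hn
    rw [List.getElem?_eq_getElem hlt] at this
    rw [List.getD_eq_getElem _ _ hlt, List.getD_eq_getElem _ _ ht]
    exact Option.some_injective _ this

-- periodicity: a prefix occurrence at q ≥ |c1| shifts down by |c1|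
lemma pvPrefix_shift (c1 c2 : List Char) (k q : Nat) (hn : 0 < c1.length) (hm : 0 < c2.length) (hq : c1.length ≤ q)
    (h : c2 <+: ((List.replicate k c1).flatten).drop q) :
    c2 <+: ((List.replicate k c1).flatten).drop (q - c1.length) := by
  have hlen := h.length_le
  rw [List.length_drop, pvBig_length] at hlen
  have hqm : q + c2.length ≤ k * c1.length := by omega
  have h1 := (pvMatch_iff_prefix c1 c2 k q hn hqm).mpr h
  refine (pvMatch_iff_prefix c1 c2 k (q - c1.length) hn (by omega)).mp ?_
  intro t ht
  have : q - c1.length + t + c1.length = q + t := by omega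
  rw [← Nat.add_mod_right (q - c1.length + t) c1.length, this]
  exact h1 t ht

-- if find succeeds on the repeated copy, its index is an offset < |c1| with a cyclic match there
lemma pvFind_analysis (c1 c2 : List Char) (k : Nat) (hn : 0 < c1.length) (hm : 0 < c2.length)
    (h : 0 ≤ PySem.Chars.find ((List.replicate k c1).flatten) c2) :
    (PySem.Chars.find ((List.replicate k c1).flatten) c2).toNat < c1.length ∧
    (∀ t, t < c2.length → c1.getD (((PySem.Chars.find ((List.replicate k c1).flatten) c2).toNat + t) % c1.length) ' ' = c2.getD t ' ') := by
  obtain ⟨hpre, hmin⟩ := PySem.Chars.find_spec h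
  set pt := (PySem.Chars.find ((List.replicate k c1).flatten) c2).toNat with hpt
  have hlen := hpre.length_le
  rw [List.length_drop, pvBig_length] at hlen
  have hlt : pt < c1.length := by
    by_contra hge
    exact hmin (pt - c1.length) (by omega) (pvPrefix_shift c1 c2 k pt hn hm (by omega) hpre)
  exact ⟨hlt, (pvMatch_iff_prefix c1 c2 k pt hn (by omega)).mpr hpre⟩

-- ===== VERDICT (by name: the statement is the Claim_ definition above) =====
theorem minRepeats_spec : Claim_equal_minRepeats := by
  intro s1 s2 _
  unfold Spec_minRepeats minRepeats minRepeats_alt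
  simp only []
  set c1 := s1.toList with hc1
  set c2 := s2.toList with hc2
  set n := c1.length with hn
  set m := c2.length with hm
  by_cases hn0 : n = 0
  · rw [if_pos hn0, hn0, List.range_zero]
    rfl
  · rw [if_neg hn0]
    have hnpos : 0 < n := Nat.pos_of_ne_zero hn0
    by_cases hm0 : m = 0
    · rw [if_pos hm0]
      obtain ⟨n', hn'⟩ : ∃ n', n = n' + 1 := ⟨n - 1, by omega⟩
      rw [List.range_eq_range', hn', List.range'_succ, pvALoop, pvAInner,
        if_neg (show ¬ 0 < m by omega)]
      rfl
    · rw [if_neg hm0]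
      have hmpos : 0 < m := Nat.pos_of_ne_zero hm0
      set k := (m + n - 1) / n + 1 with hk
      have hkn : m + n ≤ k * n := by
        have h1 := Nat.div_add_mod (m + n - 1) n
        have h2 : (m + n - 1) % n < n := Nat.mod_lt _ hnpos
        have h3 : k * n = n * ((m + n - 1) / n) + n := by rw [hk]; ring
        omega
      set p := PySem.Chars.find ((List.replicate k c1).flatten) c2 with hp
      have hinner : ∀ i, i < n → pvAInner c1 c2 n m 0 i 1 =
          if ∀ t, t < m → c1.getD ((i + t) % n) ' ' = c2.getD t ' '
          then some (1 + (i + m - 1) / n) else none := by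
        intro i hi
        rw [pvAInner_eq c1 c2 n m m 0 i 1 (by omega) hi]
        simp only [Nat.sub_zero, Nat.zero_add]
      by_cases hex : ∃ i, i < n ∧ ∀ t, t < m → c1.getD ((i + t) % n) ' ' = c2.getD t ' '
      · -- a match exists; both sides return the count at the least offset
        set i0 := Nat.find hex with hi0
        obtain ⟨hi0n, hi0M⟩ := Nat.find_spec hex
        have hA : pvALoop c1 c2 n m (List.range n) = ((1 + (i0 + m - 1) / n : Nat) : Int) := by
          rw [List.range_eq_range']
          refine pvALoop_first c1 c2 n m _ n 0 i0 (by omega) (by omega) ?_ ?_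
          · rw [hinner i0 hi0n, if_pos hi0M]
          · intro i _ hii0
            rw [hinner i (by omega), if_neg ?_]
            intro hMi
            exact Nat.find_min hex hii0 ⟨by omega, hMi⟩
        have hpre0 : c2 <+: ((List.replicate k c1).flatten).drop i0 :=
          (pvMatch_iff_prefix c1 c2 k i0 hnpos (by rw [← hn, ← hm]; omega)).mp hi0M
        have hpnn : 0 ≤ p := by
          rw [hp, PySem.Chars.find_nonneg_iff, ← PySem.Chars.isIn_iff_infix,
            ← PySem.Chars.exists_prefix_drop_iff_isIn]
          exact ⟨i0, hpre0⟩
        obtain ⟨hptn, hptM⟩ := pvFind_analysis c1 c2 k hnpos hmpos (hp ▸ hpnn)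
        obtain ⟨_, hmin⟩ := PySem.Chars.find_spec (hp ▸ hpnn)
        have hle1 : i0 ≤ p.toNat := Nat.find_min' hex ⟨hptn, hptM⟩
        have hle2 : p.toNat ≤ i0 := by
          by_contra hgt
          exact hmin i0 (by omega) hpre0
        have hpt : p.toNat = i0 := by omega
        rw [hA, if_neg (show ¬ p = -1 by omega), hpt]
        push_cast
        ring
      · -- no match at any offset: both sides return -1
        push Not at hex
        have hA : pvALoop c1 c2 n m (List.range n) = -1 := by
          refine pvALoop_none c1 c2 n m _ ?_
          intro i hi
          rw [List.mem_range] at hi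
          rw [hinner i hi, if_neg ?_]
          intro hMi
          exact (hex i hi).elim (fun t ht => by
            obtain ⟨t, ht1, ht2⟩ := (hex i hi)
            exact ht2 (hMi t ht1))
        have hpneg : p = -1 := by
          by_contra hne
          have hpnn : 0 ≤ p := by
            have := PySem.Chars.neg_one_le_find ((List.replicate k c1).flatten) c2
            rw [← hp] at this
            omega
          obtain ⟨hptn, hptM⟩ := pvFind_analysis c1 c2 k hnpos hmpos (hp ▸ hpnn)
          obtain ⟨t, ht1, ht2⟩ := hex p.toNat hptn
          exact ht2 (hptM t ht1)
        rw [hA, if_pos hpneg]
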